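-- pv_equiv track=rewrite | github.com/EmanuelML64/ayed-2025-tps | TP3/# TP 3 Ejercicio 1.py | capicua
-- ===== SOURCE A (Python) =====
-- def capicua(matriz: list[list]) -> list[int]:
--     filas = len(matriz)
--     columnas = len(matriz[0])
--     capicuas = []
--     for j in range(columnas):
--         col = [matriz[i][j] for i in range(filas)]
--
--         if col == col[::-1]:
--             capicuas.append(j + 1)
--     return capicuas
-- ===== SOURCE B (Python) =====
-- def capicua(matriz: list[list]) -> list[int]:
--     filas = len(matriz)
--     columnas = len(matriz[0])
--     capicuas = []
--     for j in range(columnas):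
--         es_capicua = True
--         for i in range(filas // 2):
--             if matriz[i][j] != matriz[filas - 1 - i][j]:
--                 es_capicua = False
--                 break
--         if es_capicua:
--             capicuas.append(j + 1)
--     return capicuas
-- ===== Notes on version B (the rewrite author's own statement) =====
-- stated objective: alternative
-- what changed: B replaces A's build-the-column-then-compare-with-a-reversed-copy test by a convergent two-pointer scan (i vs filas-1-i, only filas//2 comparisons, early break on first mismatch) that materializes no column list and no reversed copy.
import Mathlib
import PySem

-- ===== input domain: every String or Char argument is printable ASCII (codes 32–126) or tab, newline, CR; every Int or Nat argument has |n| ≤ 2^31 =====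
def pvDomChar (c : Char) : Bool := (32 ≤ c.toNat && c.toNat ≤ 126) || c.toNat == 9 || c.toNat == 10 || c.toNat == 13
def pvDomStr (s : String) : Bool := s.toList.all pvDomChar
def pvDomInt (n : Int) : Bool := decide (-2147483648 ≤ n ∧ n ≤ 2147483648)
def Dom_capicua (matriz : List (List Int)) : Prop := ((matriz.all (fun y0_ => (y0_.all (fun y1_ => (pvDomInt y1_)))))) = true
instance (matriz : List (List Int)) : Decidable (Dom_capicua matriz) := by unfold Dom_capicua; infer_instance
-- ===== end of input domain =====

-- B replaces A's build-column-and-compare-with-reversed-copy test by a two-pointer scan with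
-- early exit; same results on every input where A returns (return-value equivalence).

-- ===== PORT A =====
-- col = [matriz[i][j] for i in range(filas)]; col == col[::-1] → append j+1
def capicua (matriz : List (List Int)) : List Int :=
  let filas : Int := matriz.length
  let columnas : Int := (PySem.List.pyGetD matriz 0 []).length
  (PySem.List.pyRange 0 columnas 1).foldl
    (fun capicuas j =>
      let col := (PySem.List.pyRange 0 filas 1).map
        (fun i => PySem.List.pyGetD (PySem.List.pyGetD matriz i []) j 0)
      if col = (PySem.List.slice? col none none (-1)).getD [] then capicuas ++ [j + 1]
      else capicuas)
    []

-- ===== PORT B =====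
-- inner loop 'for i in range(filas // 2): if matriz[i][j] != matriz[filas-1-i][j]: break' as a
-- counted recursion (n = remaining iterations, i = current index); false = broke out
def checkColB (matriz : List (List Int)) (filas j : Int) : Nat → Int → Bool
  | 0, _ => true
  | n + 1, i =>
    if PySem.List.pyGetD (PySem.List.pyGetD matriz i []) j 0
       ≠ PySem.List.pyGetD (PySem.List.pyGetD matriz (filas - 1 - i) []) j 0 then false
    else checkColB matriz filas j n (i + 1)

def capicua_alt (matriz : List (List Int)) : List Int :=
  let filas : Int := matriz.length
  let columnas : Int := (PySem.List.pyGetD matriz 0 []).length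
  (PySem.List.pyRange 0 columnas 1).foldl
    (fun capicuas j =>
      if checkColB matriz filas j (PySem.Int.floordiv filas 2).toNat 0 then capicuas ++ [j + 1]
      else capicuas)
    []

-- ===== PRECONDITION & SPEC =====
-- Pre_ excludes exactly the inputs where A raises IndexError: the empty matrix (matriz[0]) and
-- ragged matrices with some row shorter than row 0 (matriz[i][j] for j < len(matriz[0])).
def Pre_capicua (matriz : List (List Int)) : Prop :=
  matriz ≠ [] ∧ ∀ row ∈ matriz, (matriz.headD []).length ≤ row.length
instance (matriz : List (List Int)) : Decidable (Pre_capicua matriz) := by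
  unfold Pre_capicua; infer_instance
def pvWitness_capicua : List (List Int) := [[1, 2], [3, 4], [1, 5]]

def Spec_capicua (matriz : List (List Int)) (out : List Int) : Prop := out = capicua_alt matriz
instance (matriz : List (List Int)) (out : List Int) : Decidable (Spec_capicua matriz out) := by
  unfold Spec_capicua; infer_instance

-- ===== CLAIM (what is proved, stated in full; the proofs are below) =====
def Claim_equal_capicua : Prop :=
  ∀ (matriz : List (List Int)), Dom_capicua matriz → Pre_capicua matriz →
    Spec_capicua matriz (capicua matriz)

-- ===== LEMMAS AND PROOFS =====

-- the shared element reader: matriz[i][j] with defaults (both ports read through it)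
def getMB (matriz : List (List Int)) (j i : Int) : Int :=
  PySem.List.pyGetD (PySem.List.pyGetD matriz i []) j 0

-- checkColB succeeds iff every remaining pair agrees
theorem checkColB_iff (matriz : List (List Int)) (filas j : Int) (n : Nat) (i : Int) :
    checkColB matriz filas j n i = true ↔
      ∀ d : Nat, d < n → getMB matriz j (i + d) = getMB matriz j (filas - 1 - (i + d)) := by
  induction n generalizing i with
  | zero => simp [checkColB]
  | succ n ih =>
    simp only [checkColB, getMB]
    split_ifs with h
    · simp only [false_iff]
      intro hall
      exact h (by simpa using hall 0 (by omega))
    · rw [ih]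
      constructor
      · intro hall d hd
        cases d with
        | zero => simpa using not_ne_iff.mp h
        | succ d =>
          have := hall d (by omega)
          have e : i + 1 + (d : Int) = i + ((d : Nat) + 1 : Nat) := by push_cast; ring
          rw [e] at this; exact this
      · intro hall d hd
        have := hall (d + 1) (by omega)
        have e : i + ((d : Nat) + 1 : Nat) = i + 1 + (d : Int) := by push_cast; ring
        rw [e] at this; exact this

-- a map over range equals its reverse iff all mirror pairs in the first half agree
theorem map_range_eq_reverse_iff (g : Nat → Int) (n : Nat) :
    (List.range n).map g = ((List.range n).map g).reverse ↔
      ∀ k : Nat, k < n / 2 → g k = g (n - 1 - k) := by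
  constructor
  · intro h k hk
    have e := congrArg (fun t : List Int => t[k]?) h
    simp only at e
    rw [List.getElem?_reverse (by simp; omega)] at e
    simp only [List.length_map, List.length_range] at e
    rw [List.getElem?_eq_getElem (by simp; omega),
        List.getElem?_eq_getElem (by simp; omega)] at e
    simpa using e
  · intro h
    apply List.ext_getElem (by simp)
    intro i h1 h2
    rw [List.getElem_reverse]
    simp only [List.getElem_map, List.getElem_range, List.length_map, List.length_range]
    by_cases hhalf : i < n / 2
    · exact h i hhalf
    · by_cases hmid : n - 1 - i = i
      · rw [hmid]
      · have h2' : n - 1 - i < n / 2 := by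
          simp only [List.length_map, List.length_range] at h1
          omega
        have := h _ h2'
        have e : n - 1 - (n - 1 - i) = i := by
          simp only [List.length_map, List.length_range] at h1
          omega
        rw [e] at this
        exact this.symm

-- A's per-column test, expressed through getMB, equals B's two-pointer test
theorem colTest_eq (matriz : List (List Int)) (j : Int) :
    (let col := (PySem.List.pyRange 0 (matriz.length : Int) 1).map (fun i => getMB matriz j i)
     col = (PySem.List.slice? col none none (-1)).getD []) ↔
    checkColB matriz (matriz.length : Int) j
      (PySem.Int.floordiv (matriz.length : Int) 2).toNat 0 = true := by
  set F := matriz.length with hF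
  simp only [PySem.List.slice?_none_none_neg_one, Option.getD_some]
  have hcol : (PySem.List.pyRange 0 (F : Int) 1).map (fun i => getMB matriz j i)
      = (List.range F).map (fun k : Nat => getMB matriz j (k : Int)) := by
    rw [PySem.List.pyRange_zero, Int.toNat_natCast, List.map_map]
    rfl
  rw [hcol, map_range_eq_reverse_iff, checkColB_iff]
  have hdiv : (PySem.Int.floordiv (F : Int) 2).toNat = F / 2 := by
    rw [show ((2 : Int) = ((2 : Nat) : Int)) by norm_num, PySem.Int.floordiv_natCast]
    exact Int.toNat_natCast _
  rw [hdiv]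
  have ecast : ∀ d : Nat, d < F / 2 →
      ((F : Int) - 1 - (d : Int)) = ((F - 1 - d : Nat) : Int) := by
    intro d hd
    push_cast [Nat.cast_sub (by omega : d ≤ F - 1), Nat.cast_sub (by omega : 1 ≤ F)]
    ring
  constructor
  · intro h d hd
    rw [zero_add, ecast d hd]
    exact h d hd
  · intro h k hk
    have := h k hk
    rw [zero_add, ecast k hk] at this
    exact this

-- ===== VERDICT (by name: the statement is the Claim_ definition above) =====
theorem capicua_spec : Claim_equal_capicua := by
  intro matriz _ _
  unfold Spec_capicua capicua capicua_alt
  apply PySem.List.foldl_congr_mem'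
  intro j _ acc
  have h := colTest_eq matriz j
  simp only [getMB] at h
  simp only []
  split_ifs with h1 h2 h3
  · rfl
  · exact absurd (h.mp h1) h2
  · exact absurd (h.mpr h3) h1
  · rfl
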